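-- pv_equiv track=rewrite | github.com/Heejun-0219/market-api | app/services/enhance_market.py | _analyze_bonds
-- ===== SOURCE A (Python) =====
-- def _analyze_bonds(bond_changes: dict) -> str:
--     """채권 시장 분석"""
--     if not bond_changes:
--         return 'UNKNOWN'
--
--     up_count = sum(1 for change in bond_changes.values()
--                   if change and change.get('direction') == 'UP')
--     down_count = sum(1 for change in bond_changes.values()
--                     if change and change.get('direction') == 'DOWN')
--
--     if up_count > down_count:
--         return 'YIELD_RISING'
--     elif down_count > up_count:
--         return 'YIELD_FALLING'
--     else:
--         return 'STABLE'
-- ===== SOURCE B (Python) =====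
-- def _analyze_bonds(bond_changes: dict) -> str:
--     """One-pass net accumulator instead of two separate counting passes."""
--     if not bond_changes:
--         return 'UNKNOWN'
--     net = 0
--     for change in bond_changes.values():
--         if change:
--             d = change.get('direction')
--             if d == 'UP':
--                 net += 1
--             elif d == 'DOWN':
--                 net -= 1
--     if net > 0:
--         return 'YIELD_RISING'
--     if net < 0:
--         return 'YIELD_FALLING'
--     return 'STABLE'
-- ===== Notes on version B (the rewrite author's own statement) =====
-- stated objective: simpler
-- what changed: Replaces the two independent counting passes over bond_changes.values() with a single pass maintaining one signed net accumulator, deciding the result from the sign of net.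
import Mathlib
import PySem

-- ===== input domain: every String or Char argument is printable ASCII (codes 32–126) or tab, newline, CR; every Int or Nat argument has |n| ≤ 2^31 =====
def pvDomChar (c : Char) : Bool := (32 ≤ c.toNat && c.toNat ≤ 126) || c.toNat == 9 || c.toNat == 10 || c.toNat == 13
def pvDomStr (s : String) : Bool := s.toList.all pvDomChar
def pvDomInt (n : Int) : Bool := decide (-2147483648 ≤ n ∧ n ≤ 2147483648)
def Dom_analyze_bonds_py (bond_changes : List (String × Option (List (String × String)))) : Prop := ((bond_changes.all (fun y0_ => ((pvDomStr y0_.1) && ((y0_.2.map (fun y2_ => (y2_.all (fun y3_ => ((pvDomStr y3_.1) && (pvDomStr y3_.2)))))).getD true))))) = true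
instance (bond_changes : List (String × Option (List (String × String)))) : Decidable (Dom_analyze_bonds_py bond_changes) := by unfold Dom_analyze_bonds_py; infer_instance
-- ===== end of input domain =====

-- B replaces A's two counting passes over the values with a single pass keeping one signed net accumulator (simpler decomposition).


-- ===== PORT A =====
-- 'change and change.get('direction') == dir' : change truthy (not None, not empty dict) and lookup equals dir
def pvCondA (o : Option (List (String × String))) (dir : String) : Bool :=
  match o with
  | none => false
  | some d => (!(d = [])) && (PySem.Dict.get? (PySem.Dict.mk d) "direction" == some dir)

def analyze_bonds_py (bond_changes : List (String × Option (List (String × String)))) : String :=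
  if bond_changes = [] then "UNKNOWN"
  else
    let vals := bond_changes.map Prod.snd
    let up_count : Int := vals.foldl (fun a o => if pvCondA o "UP" then a + 1 else a) 0
    let down_count : Int := vals.foldl (fun a o => if pvCondA o "DOWN" then a + 1 else a) 0
    if up_count > down_count then "YIELD_RISING"
    else if down_count > up_count then "YIELD_FALLING"
    else "STABLE"

-- ===== PORT B =====
def pvStepB (n : Int) (kv : String × Option (List (String × String))) : Int :=
  match kv.2 with
  | none => n
  | some d =>
    if d = [] then n
    else
      match PySem.Dict.get? (PySem.Dict.mk d) "direction" with
      | some "UP" => n + 1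
      | some "DOWN" => n - 1
      | _ => n

def analyze_bonds_py_alt (bond_changes : List (String × Option (List (String × String)))) : String :=
  if bond_changes = [] then "UNKNOWN"
  else
    let net := bond_changes.foldl pvStepB 0
    if net > 0 then "YIELD_RISING"
    else if net < 0 then "YIELD_FALLING"
    else "STABLE"

-- ===== PRECONDITION & SPEC =====
def Spec_analyze_bonds_py (bond_changes : List (String × Option (List (String × String)))) (out : String) : Prop := out = analyze_bonds_py_alt bond_changes
instance (bond_changes : List (String × Option (List (String × String)))) (out : String) : Decidable (Spec_analyze_bonds_py bond_changes out) := by unfold Spec_analyze_bonds_py; infer_instance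

-- ===== CLAIM (what is proved, stated in full; the proofs are below) =====
def Claim_equal_analyze_bonds_py : Prop := ∀ (bond_changes : List (String × Option (List (String × String)))), Dom_analyze_bonds_py bond_changes → Spec_analyze_bonds_py bond_changes (analyze_bonds_py bond_changes)

-- ===== LEMMAS AND PROOFS =====

-- per-element: B's step is A's +1-for-UP minus +1-for-DOWN
theorem pvStepB_eq (n : Int) (kv : String × Option (List (String × String))) :
    pvStepB n kv =
      n + (if pvCondA kv.2 "UP" then (1 : Int) else 0)
        - (if pvCondA kv.2 "DOWN" then (1 : Int) else 0) := by
  rcases kv with ⟨k, o⟩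
  rcases o with _ | d
  · simp [pvStepB, pvCondA]
  · simp only [pvStepB, pvCondA]
    by_cases hd : d = []
    · simp [hd]
    · simp only [hd, if_neg hd]
      rcases hget : PySem.Dict.get? (PySem.Dict.mk d) "direction" with _ | s
      · simp [hget]
      · by_cases hU : s = "UP"
        · simp [hget, hU]
        · by_cases hD : s = "DOWN"
          · subst hD; simp [hget, hU]
          · simp [hget, hU, hD]

-- counting fold with an accumulator
theorem foldl_count (p : Option (List (String × String)) → Bool)
    (l : List (Option (List (String × String)))) (a : Int) :
    l.foldl (fun a o => if p o then a + 1 else a) a = a + (l.countP p : Int) := by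
  induction l generalizing a with
  | nil => simp
  | cons x xs ih =>
    by_cases h : p x <;> simp [List.countP_cons, h, ih] <;> ring

-- the net fold is up-count minus down-count
theorem net_eq (l : List (String × Option (List (String × String)))) (n : Int) :
    l.foldl pvStepB n =
      n + ((l.map Prod.snd).countP (fun o => pvCondA o "UP") : Int)
        - ((l.map Prod.snd).countP (fun o => pvCondA o "DOWN") : Int) := by
  induction l generalizing n with
  | nil => simp
  | cons x xs ih =>
    simp only [List.foldl_cons, List.map_cons, List.countP_cons]
    rw [ih, pvStepB_eq]
    by_cases hU : pvCondA x.2 "UP" = true <;> by_cases hD : pvCondA x.2 "DOWN" = true <;>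
      simp [hU, hD] <;> push_cast <;> ring

-- ===== VERDICT (by name: the statement is the Claim_ definition above) =====
theorem analyze_bonds_py_spec : Claim_equal_analyze_bonds_py := by
  intro bc _
  unfold Spec_analyze_bonds_py analyze_bonds_py analyze_bonds_py_alt
  by_cases h : bc = []
  · simp [h]
  · simp only [h, if_neg h]
    rw [net_eq, foldl_count, foldl_count]
    set u : Int := ((bc.map Prod.snd).countP (fun o => pvCondA o "UP") : Int)
    set d : Int := ((bc.map Prod.snd).countP (fun o => pvCondA o "DOWN") : Int)
    by_cases h1 : (0 : Int) + u > 0 + d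
    · have : (0 : Int) + u - d > 0 := by omega
      simp [h1, this]
    · by_cases h2 : (0 : Int) + d > 0 + u
      · have hn : ¬ ((0 : Int) + u - d > 0) := by omega
        have : (0 : Int) + u - d < 0 := by omega
        simp [h1, h2, hn, this]
      · have hn : ¬ ((0 : Int) + u - d > 0) := by omega
        have hn2 : ¬ ((0 : Int) + u - d < 0) := by omega
        simp [h1, h2, hn, hn2]
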